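/- GENERATED by farm/mkstatement.py from design/units.tsv (unit `gif_decode.E`) and the assertions of Gif/Spec/Seg_gif_decode.lean — do not edit.
   THE STATEMENT of the proof unit `gif_decode.E`: segment E of `gif_decode` (9 instructions; entries 0x10afdb;
   exits ret; ranges 0x10afdb-0x10b000)
   takes each of its entry assertions to one of its exit assertions (`Gif.Spec.gif_decode.SegE`), given the contracts of its callees.
   What the names mean: ProgX/Base/Spec/Basic.lean (the shared hypotheses), Gif/Spec/Seg_gif_decode.lean (the assertions). The theorem to prove:
   `theorem gif_decode_E_ok : Gif.Spec.gif_decode_E.Statement`. -/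
import Gif.Code
import Gif.Dec.All
import Gif.Labels
import Gif.Spec.Seg_gif_decode
namespace Gif.Spec.gif_decode_E
open X86 X86.User Asan

/-- The statement of unit `gif_decode.E`. -/
def Statement : Prop :=
  ∀ (Lay : Layout) (_hLay : Lay.hi = 0x1000000) (μ : Microarch) (_hμ : UserX.MicroOK μ) (u₀ : State)
    (_hcode : HasCodeNat Lay u₀ Gif.L.gif_decode.entry Gif.Code.code_gif_decode.nat Gif.L.gif_decode.size),
    Gif.Spec.gif_decode.SegE Lay μ u₀

end Gif.Spec.gif_decode_E
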